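-- pv_equiv track=rewrite | github.com/n-chafik/CourseTortues | PositionPrediction.py | prediction_cyclic
-- ===== SOURCE A (Python) =====
-- def prediction_cyclic(window, pos1, pos2, pos3, delta_top):
--     speeds = []
--     current_speed = 0
--     for i in range(len(window)):
--         if window[i] == pos2 - pos1:
--             current_speed = i
--             break
--
--     for i in range(delta_top):
--         speeds.append(window[(current_speed + i) % len(window)])
--
--     return pos1 + sum(speeds)
-- ===== SOURCE B (Python) =====
-- def prediction_cyclic(window, pos1, pos2, pos3, delta_top):
--     if delta_top <= 0:
--         return pos1
--     n = len(window)
--     d = pos2 - pos1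
--     s = window.index(d) if d in window else 0
--     prefix = [0]
--     for x in window:
--         prefix.append(prefix[-1] + x)
--     total = prefix[n]
--     q, r = divmod(delta_top, n)
--     e = s + r
--     if e <= n:
--         part = prefix[e] - prefix[s]
--     else:
--         part = total - prefix[s] + prefix[e - n]
--     return pos1 + q * total + part
-- ===== Notes on version B (the rewrite author's own statement) =====
-- stated objective: alternative
-- what changed: Replaces the O(delta_top) element-by-element cyclic accumulation with full-cycle arithmetic (delta_top // n complete cycles times the window total) plus a prefix-sum lookup for the partial cycle, so the cost no longer depends on delta_top.
import Mathlib
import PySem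

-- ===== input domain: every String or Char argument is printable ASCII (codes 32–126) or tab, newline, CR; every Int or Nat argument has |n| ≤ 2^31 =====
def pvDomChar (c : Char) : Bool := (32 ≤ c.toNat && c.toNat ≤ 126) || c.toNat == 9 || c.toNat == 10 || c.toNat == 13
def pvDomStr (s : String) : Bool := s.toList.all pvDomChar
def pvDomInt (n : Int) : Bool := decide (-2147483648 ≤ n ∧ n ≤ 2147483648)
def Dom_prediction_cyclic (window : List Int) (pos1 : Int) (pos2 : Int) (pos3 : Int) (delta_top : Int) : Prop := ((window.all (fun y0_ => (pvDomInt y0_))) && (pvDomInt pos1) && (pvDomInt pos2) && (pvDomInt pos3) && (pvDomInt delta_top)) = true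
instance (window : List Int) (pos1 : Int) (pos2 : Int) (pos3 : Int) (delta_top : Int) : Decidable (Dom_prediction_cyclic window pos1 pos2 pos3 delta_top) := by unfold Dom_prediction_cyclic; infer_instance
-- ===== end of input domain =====

-- B replaces A's element-by-element cyclic accumulation with full-cycle arithmetic plus
-- prefix sums, so its cost no longer depends on delta_top (objective: alternative).

-- ===== PORT A =====
-- first loop of A: scan for the first index whose element equals pos2 - pos1 (0 if none)
def pvFindA : List Int → Int → Nat → Nat
  | [], _, _ => 0
  | x :: xs, d, i => if x = d then i else pvFindA xs d (i + 1)

def prediction_cyclic (window : List Int) (pos1 : Int) (pos2 : Int) (pos3 : Int) (delta_top : Int) : Int :=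
  let n : Int := window.length
  let current_speed : Int := (pvFindA window (pos2 - pos1) 0 : Nat)
  -- second loop: speeds.append(window[(current_speed + i) % len(window)]); inside Pre_ the
  -- index is in range, so pyGetD's default is never used; the appended list is built
  -- back-to-front (cons) and reversed, the linear-time encoding of list append
  let speeds : List Int :=
    ((PySem.List.pyRange 0 delta_top 1).foldl
      (fun acc i => PySem.List.pyGetD window (PySem.Int.mod (current_speed + i) n) 0 :: acc) []).reverse
  -- Python's sum() is a left-to-right accumulation
  pos1 + speeds.foldl (· + ·) 0

-- ===== PORT B =====
def prediction_cyclic_alt (window : List Int) (pos1 : Int) (pos2 : Int) (pos3 : Int) (delta_top : Int) : Int :=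
  if delta_top ≤ 0 then pos1 else
  let n : Int := window.length
  let d : Int := pos2 - pos1
  let s : Int := match PySem.List.index? window d with | some i => (i : Int) | none => 0
  -- prefix = [0]; for x in window: prefix.append(prefix[-1] + x)
  let prefixL : List Int :=
    window.foldl (fun acc x => acc ++ [PySem.List.pyGetD acc (-1) 0 + x]) [0]
  let total : Int := PySem.List.pyGetD prefixL n 0
  let q : Int := PySem.Int.floordiv delta_top n
  let r : Int := PySem.Int.mod delta_top n
  let e : Int := s + r
  let part : Int :=
    if e ≤ n then PySem.List.pyGetD prefixL e 0 - PySem.List.pyGetD prefixL s 0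
    else total - PySem.List.pyGetD prefixL s 0 + PySem.List.pyGetD prefixL (e - n) 0
  pos1 + q * total + part

-- ===== PRECONDITION & SPEC =====
-- A raises ZeroDivisionError ('% len(window)') exactly when the window is empty and delta_top > 0.
def Pre_prediction_cyclic (window : List Int) (pos1 : Int) (pos2 : Int) (pos3 : Int) (delta_top : Int) : Prop :=
  delta_top ≤ 0 ∨ window ≠ []
instance (window : List Int) (pos1 : Int) (pos2 : Int) (pos3 : Int) (delta_top : Int) : Decidable (Pre_prediction_cyclic window pos1 pos2 pos3 delta_top) := by unfold Pre_prediction_cyclic; infer_instance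

def pvWitness_prediction_cyclic : List Int × Int × Int × Int × Int := ([2, -1, 3], 5, 4, 0, 7)

def Spec_prediction_cyclic (window : List Int) (pos1 : Int) (pos2 : Int) (pos3 : Int) (delta_top : Int) (out : Int) : Prop := out = prediction_cyclic_alt window pos1 pos2 pos3 delta_top
instance (window : List Int) (pos1 : Int) (pos2 : Int) (pos3 : Int) (delta_top : Int) (out : Int) : Decidable (Spec_prediction_cyclic window pos1 pos2 pos3 delta_top out) := by unfold Spec_prediction_cyclic; infer_instance

-- ===== CLAIM (what is proved, stated in full; the proofs are below) =====
def Claim_equal_prediction_cyclic : Prop := ∀ (window : List Int) (pos1 : Int) (pos2 : Int) (pos3 : Int) (delta_top : Int), Dom_prediction_cyclic window pos1 pos2 pos3 delta_top → Pre_prediction_cyclic window pos1 pos2 pos3 delta_top → Spec_prediction_cyclic window pos1 pos2 pos3 delta_top (prediction_cyclic window pos1 pos2 pos3 delta_top)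

-- ===== LEMMAS AND PROOFS =====

-- pvFindA agrees with index? (first match, 0 if absent)
theorem pvFindA_eq_index? (xs : List Int) (d : Int) (i : Nat) :
    pvFindA xs d i = match PySem.List.index? xs d with | some k => i + k | none => 0 := by
  induction xs generalizing i with
  | nil => simp [pvFindA, PySem.List.index?]
  | cons x t ih =>
    by_cases h : x = d
    · subst h
      rw [PySem.List.index?_cons_self]
      simp [pvFindA]
    · rw [PySem.List.index?_cons_of_ne t h]
      simp only [pvFindA, if_neg h]
      rw [ih (i + 1)]
      cases PySem.List.index? t d with
      | none => simp
      | some k =>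
        simp only [Option.map_some]
        show i + 1 + k = i + (k + 1)
        omega

-- the found index is in range when the window is nonempty
theorem pvFindA_lt (xs : List Int) (d : Int) (h : xs ≠ []) : pvFindA xs d 0 < xs.length := by
  rw [pvFindA_eq_index?]
  cases hk : PySem.List.index? xs d with
  | none => simpa using List.length_pos_of_ne_nil h
  | some k =>
    obtain ⟨hlt, -, -⟩ := PySem.List.getElem_of_index?_eq_some hk
    simpa using hlt

-- the fold building B's prefix list is scanl (+)
theorem prefix_fold_eq_scanl (xs : List Int) (L : List Int) (v : Int) :
    xs.foldl (fun acc x => acc ++ [PySem.List.pyGetD acc (-1) 0 + x]) (L ++ [v])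
      = L ++ List.scanl (· + ·) v xs := by
  induction xs generalizing L v with
  | nil => simp
  | cons x t ih =>
    rw [List.scanl_cons]
    simp only [List.foldl_cons, PySem.List.pyGetD_neg_one_append_singleton]
    rw [ih (L ++ [v]) (v + x)]
    simp

-- indexing the scanl prefix list gives a prefix sum
theorem scanl_getD (xs : List Int) (v : Int) (j : Nat) (hj : j ≤ xs.length) :
    (List.scanl (· + ·) v xs).getD j 0 = v + (xs.take j).sum := by
  induction xs generalizing v j with
  | nil =>
    have : j = 0 := by simpa using hj
    subst this; simp
  | cons x t ih =>
    cases j with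
    | zero => simp
    | succ j =>
      rw [List.scanl_cons]
      simp only [List.getD_cons_succ, List.take_succ_cons, List.sum_cons]
      rw [ih (v + x) j (by simpa using hj)]
      ring

-- one-step prefix sum extension
theorem take_succ_sum (w : List Int) (j : Nat) (hj : j < w.length) :
    (w.take (j + 1)).sum = (w.take j).sum + w.getD j 0 := by
  rw [List.getD_eq_getElem w 0 hj, List.sum_take_succ w j hj]

-- the cyclic sum of A's second loop, Nat-indexed
def pvCyc (w : List Int) (s K : Nat) : Int :=
  ((List.range K).map (fun k => w.getD ((s + k) % w.length) 0)).sum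

-- the partial-cycle value B computes from prefix sums
def pvSeg (w : List Int) (s r : Nat) : Int :=
  if s + r ≤ w.length then (w.take (s + r)).sum - (w.take s).sum
  else w.sum - (w.take s).sum + (w.take (s + r - w.length)).sum

theorem pvCyc_eq_pvSeg (w : List Int) (s r : Nat) (hs : s < w.length) (hr : r ≤ w.length) :
    pvCyc w s r = pvSeg w s r := by
  induction r with
  | zero => simp [pvCyc, pvSeg, Nat.le_of_lt hs]
  | succ r ih =>
    have hr' : r ≤ w.length := by omega
    rw [pvCyc, List.range_succ, List.map_append, List.sum_append]
    rw [show (((List.range r).map (fun k => w.getD ((s + k) % w.length) 0)).sum) = pvCyc w s r from rfl]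
    rw [ih hr']
    simp only [List.map_cons, List.map_nil, List.sum_cons, List.sum_nil, add_zero]
    by_cases hc : s + r < w.length
    · have hmod : (s + r) % w.length = s + r := Nat.mod_eq_of_lt hc
      rw [hmod, pvSeg, pvSeg]
      by_cases hc2 : s + (r + 1) ≤ w.length
      · rw [if_pos (by omega), if_pos hc2, show s + (r + 1) = (s + r) + 1 by ring,
          take_succ_sum w (s + r) hc]
        ring
      · omega
    · have hwrap : s + r - w.length < w.length := by omega
      have hmod : (s + r) % w.length = s + r - w.length := by
        have h2 : s + r - w.length + w.length = s + r := by omega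
        calc (s + r) % w.length = (s + r - w.length + w.length) % w.length := by rw [h2]
          _ = (s + r - w.length) % w.length := Nat.add_mod_right _ _
          _ = s + r - w.length := Nat.mod_eq_of_lt hwrap
      rw [hmod, pvSeg, pvSeg]
      by_cases hb : s + r = w.length
      · rw [if_pos (by omega), if_neg (by omega)]
        rw [show s + (r + 1) - w.length = (s + r - w.length) + 1 by omega,
          take_succ_sum w (s + r - w.length) hwrap, hb]
        simp [List.take_length]
      · rw [if_neg (by omega), if_neg (by omega)]
        rw [show s + (r + 1) - w.length = (s + r - w.length) + 1 by omega,
          take_succ_sum w (s + r - w.length) hwrap]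
        ring

theorem pvCyc_full (w : List Int) (s : Nat) (hs : s < w.length) :
    pvCyc w s w.length = w.sum := by
  rw [pvCyc_eq_pvSeg w s w.length hs (le_refl _), pvSeg]
  by_cases h : s = 0
  · subst h; simp
  · rw [if_neg (by omega)]
    simp

theorem pvCyc_add_length (w : List Int) (s m : Nat) (hs : s < w.length) :
    pvCyc w s (w.length + m) = w.sum + pvCyc w s m := by
  rw [pvCyc, List.range_add, List.map_append, List.sum_append]
  rw [show (((List.range w.length).map (fun k => w.getD ((s + k) % w.length) 0)).sum) = pvCyc w s w.length from rfl]
  rw [pvCyc_full w s hs]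
  congr 1
  rw [pvCyc, List.map_map]
  congr 1
  apply List.map_congr_left
  intro k _
  simp only [Function.comp_apply]
  congr 1
  have h3 : s + (w.length + k) = (s + k) + w.length := by ring
  rw [h3, Nat.add_mod_right]

-- the main closed form: cyclic sum = full cycles + partial segment
theorem pvCyc_closed (w : List Int) (s K : Nat) (hs : s < w.length) :
    pvCyc w s K = (K / w.length : Nat) * w.sum + pvSeg w s (K % w.length) := by
  induction K using Nat.strong_induction_on with
  | _ K ih =>
    by_cases hK : K < w.length
    · rw [Nat.div_eq_of_lt hK, Nat.mod_eq_of_lt hK]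
      simp [pvCyc_eq_pvSeg w s K hs (by omega)]
    · have hn : 0 < w.length := by omega
      have hKm : K = w.length + (K - w.length) := by omega
      rw [hKm, pvCyc_add_length w s _ hs, ih (K - w.length) (by omega)]
      have hdiv : (w.length + (K - w.length)) / w.length = (K - w.length) / w.length + 1 := by
        rw [Nat.add_comm, Nat.add_div_right _ hn]
      have hmod : (w.length + (K - w.length)) % w.length = (K - w.length) % w.length := by
        rw [Nat.add_comm, Nat.add_mod_right]
      rw [hdiv, hmod]
      push_cast
      ring

-- the cons-accumulating loop body, as a map
theorem foldl_cons_rev (f : Int → Int) (l : List Int) (acc : List Int) :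
    l.foldl (fun a x => f x :: a) acc = (l.map f).reverse ++ acc := by
  induction l generalizing acc with
  | nil => simp
  | cons x t ih => simp [ih]

-- A's value in terms of pvCyc (inside Pre_, delta_top > 0 case)
theorem prediction_cyclic_eq_pvCyc (w : List Int) (p1 p2 p3 dt : Int)
    (hw : w ≠ []) (hdt : 0 < dt) :
    prediction_cyclic w p1 p2 p3 dt = p1 + pvCyc w (pvFindA w (p2 - p1) 0) dt.toNat := by
  unfold prediction_cyclic
  dsimp only
  rw [foldl_cons_rev, ← List.sum_eq_foldl]
  simp only [List.append_nil, List.reverse_reverse]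
  congr 1
  rw [pvCyc, PySem.List.pyRange_one, List.map_map]
  congr 1
  rw [show dt - 0 = dt by ring]
  apply List.map_congr_left
  intro k _
  simp only [Function.comp_apply, zero_add]
  have hcast : ((pvFindA w (p2 - p1) 0 : Nat) : Int) + (k : Int) = ((pvFindA w (p2 - p1) 0 + k : Nat) : Int) := by push_cast; ring
  rw [hcast, PySem.Int.mod_natCast, PySem.List.pyGetD_natCast]

-- B's s equals A's found index
theorem alt_s_eq (w : List Int) (d : Int) :
    (match PySem.List.index? w d with | some i => (i : Int) | none => 0)
      = ((pvFindA w d 0 : Nat) : Int) := by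
  rw [pvFindA_eq_index?]
  cases PySem.List.index? w d with
  | none => simp
  | some k => simp

-- ===== VERDICT (by name: the statement is the Claim_ definition above) =====
theorem prediction_cyclic_spec : Claim_equal_prediction_cyclic := by
  intro w p1 p2 p3 dt _ hpre
  unfold Spec_prediction_cyclic
  by_cases hdt : dt ≤ 0
  · unfold prediction_cyclic prediction_cyclic_alt
    rw [if_pos hdt, PySem.List.pyRange_one_eq_nil (by omega)]
    simp
  · replace hdt : 0 < dt := by omega
    have hw : w ≠ [] := by
      rcases hpre with h | h
      · omega
      · exact h
    have hn : 0 < w.length := List.length_pos_of_ne_nil hw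
    set s : Nat := pvFindA w (p2 - p1) 0 with hs_def
    have hs : s < w.length := pvFindA_lt w (p2 - p1) hw
    rw [prediction_cyclic_eq_pvCyc w p1 p2 p3 dt hw hdt]
    unfold prediction_cyclic_alt
    rw [if_neg (by omega)]
    simp only
    rw [alt_s_eq w (p2 - p1), ← hs_def]
    -- rewrite the prefix list fold as scanl
    have hpref : w.foldl (fun acc x => acc ++ [PySem.List.pyGetD acc (-1) 0 + x]) [0]
        = List.scanl (· + ·) 0 w := by
      have := prefix_fold_eq_scanl w [] 0
      simpa using this
    rw [hpref]
    -- indices: everything via Nat casts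
    set K : Nat := dt.toNat with hK_def
    have hdtK : dt = (K : Int) := by omega
    have hKn : PySem.Int.floordiv dt (w.length : Int) = ((K / w.length : Nat) : Int) := by
      rw [hdtK]; exact_mod_cast PySem.Int.floordiv_natCast K w.length
    have hKm : PySem.Int.mod dt (w.length : Int) = ((K % w.length : Nat) : Int) := by
      rw [hdtK]; exact_mod_cast PySem.Int.mod_natCast K w.length
    rw [hKn, hKm]
    set r : Nat := K % w.length with hr_def
    have hrlt : r < w.length := Nat.mod_lt _ hn
    have hgetD : ∀ (j : Nat), j ≤ w.length →
        PySem.List.pyGetD (List.scanl (· + ·) 0 w) ((j : Nat) : Int) 0 = (w.take j).sum := by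
      intro j hj
      rw [PySem.List.pyGetD_natCast, scanl_getD w 0 j hj]
      ring
    have htotal : PySem.List.pyGetD (List.scanl (· + ·) 0 w) ((w.length : Nat) : Int) 0 = w.sum := by
      rw [hgetD w.length (le_refl _)]
      simp [List.take_length]
    rw [pvCyc_closed w s K hs, ← hr_def]
    have hse : ((s : Int) + (r : Int)) = ((s + r : Nat) : Int) := by push_cast; ring
    rw [htotal, hse]
    by_cases hcase : s + r ≤ w.length
    · rw [if_pos (by exact_mod_cast hcase)]
      rw [hgetD (s + r) hcase, hgetD s (by omega), pvSeg, if_pos hcase]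
      ring
    · rw [if_neg (by push_cast; omega)]
      have hsub : ((s + r : Nat) : Int) - (w.length : Int) = ((s + r - w.length : Nat) : Int) := by
        push_cast; omega
      rw [hsub, hgetD (s + r - w.length) (by omega), hgetD s (by omega), pvSeg, if_neg hcase]
      ring
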